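-- pv_equiv track=rewrite | github.com/whitem4rk/2023-algorithm-study | LEVEL 2/disguise.py | solution
-- ===== SOURCE A (Python) =====
-- def solution(clothes):
--     category = {}
--     for cloth in clothes:
--         if cloth[1] in category:
--             category[cloth[1]] += 1
--         else:
--             category[cloth[1]] = 1
--
--     answer = 1
--     for cnt in category.values():
--         answer *= (cnt+1)
--
--     return answer - 1
-- ===== SOURCE B (Python) =====
-- def solution(clothes):
--     # Alternative decomposition: recursive partition by the first remaining
--     # category key -- no dict; multiply (count+1) per distinct key, minus 1.
--     def prod(ks):
--         if not ks:
--             return 1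
--         k = ks[0]
--         return (ks.count(k) + 1) * prod([x for x in ks if x != k])
--     return prod([c[1] for c in clothes]) - 1
-- ===== Notes on version B (the rewrite author's own statement) =====
-- stated objective: alternative
-- what changed: Replaces the dict-counter accumulation with a recursive partition: repeatedly take the first remaining category key, multiply by (its count + 1), and recurse on the list with that key filtered out; no dictionary is built.
import Mathlib
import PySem

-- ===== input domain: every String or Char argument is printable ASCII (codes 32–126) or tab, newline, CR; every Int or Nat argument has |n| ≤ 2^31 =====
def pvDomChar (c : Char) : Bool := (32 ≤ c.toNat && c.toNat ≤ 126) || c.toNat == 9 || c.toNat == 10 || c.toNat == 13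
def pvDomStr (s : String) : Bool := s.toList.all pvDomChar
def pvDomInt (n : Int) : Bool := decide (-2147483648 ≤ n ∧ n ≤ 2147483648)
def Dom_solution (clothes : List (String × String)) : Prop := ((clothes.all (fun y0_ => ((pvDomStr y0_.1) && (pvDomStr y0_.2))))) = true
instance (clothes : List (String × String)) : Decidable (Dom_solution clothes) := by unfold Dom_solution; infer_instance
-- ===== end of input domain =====

-- B replaces A's dict-counter accumulation by a recursive partition on the first remaining category key (alternative decomposition, no speed claim).

-- B changes the algorithm (recursive partition by first key instead of a dict counter); same cost class, not claimed faster.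

-- ===== PORT A =====
def solution (clothes : List (String × String)) : Int :=
  let category := clothes.foldl (fun d c =>
    if d.contains c.2 then d.insert c.2 (d.getD c.2 0 + 1)
    else d.insert c.2 1) PySem.Dict.empty
  let answer := category.values.foldl (fun a cnt => a * (cnt + 1)) 1
  answer - 1

-- ===== PORT B =====
def altProd : List String → Int
  | [] => 1
  | k :: rest => (((k :: rest).count k : Int) + 1) * altProd ((k :: rest).filter (fun x => x != k))
termination_by ks => ks.length
decreasing_by
  simp only [List.filter_cons, bne_self_eq_false, List.length_cons]
  exact Nat.lt_succ_of_le (List.length_filter_le _ _)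

def solution_alt (clothes : List (String × String)) : Int :=
  altProd (clothes.map (fun c => c.2)) - 1

-- ===== PRECONDITION & SPEC =====
def Spec_solution (clothes : List (String × String)) (out : Int) : Prop := out = solution_alt clothes
instance (clothes : List (String × String)) (out : Int) : Decidable (Spec_solution clothes out) := by unfold Spec_solution; infer_instance

-- ===== CLAIM (what is proved, stated in full; the proofs are below) =====
def Claim_equal_solution : Prop := ∀ (clothes : List (String × String)), Dom_solution clothes → Spec_solution clothes (solution clothes)

-- ===== LEMMAS AND PROOFS =====

theorem ofList_append_singleton (l : List String) (x : String) :
    PySem.Set.ofList (l ++ [x]) = PySem.Set.add (PySem.Set.ofList l) x := by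
  simp [PySem.Set.ofList_eq_foldl, List.foldl_append]


theorem ofList_filter (p : String → Bool) (l : List String) :
    PySem.Set.ofList (l.filter p) = (PySem.Set.ofList l).filter p := by
  induction l using List.reverseRecOn with
  | nil => rfl
  | append_singleton l x ih =>
    rw [List.filter_append, ofList_append_singleton]
    by_cases hp : p x
    · simp only [hp, List.filter_singleton, cond_true]
      rw [ofList_append_singleton, ih]
      unfold PySem.Set.add
      have hmem : ∀ s : List String, PySem.Set.contains s x = decide (x ∈ s) := by
        intro s; simp [PySem.Set.contains_iff]
      rw [hmem, hmem]
      by_cases hm : x ∈ PySem.Set.ofList l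
      · have h2 : x ∈ (PySem.Set.ofList l).filter p := List.mem_filter.2 ⟨hm, hp⟩
        simp [hm, h2]
      · have h2 : x ∉ (PySem.Set.ofList l).filter p := fun h => hm (List.mem_filter.1 h).1
        simp [hm, h2, List.filter_append, hp]
    · simp only [hp, List.filter_singleton, cond_false, List.append_nil, ih]
      unfold PySem.Set.add
      by_cases hm : x ∈ PySem.Set.ofList l <;> simp [hm, List.filter_append, hp]


theorem ofList_cons (k : String) (l : List String) :
    PySem.Set.ofList (k :: l) = k :: (PySem.Set.ofList l).filter (fun x => x != k) := by
  have h : PySem.Set.ofList (k :: l) = PySem.Set.update [k] l := by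
    simp [PySem.Set.ofList_eq_foldl, PySem.Set.update]
  rw [h, PySem.Set.update_eq_append_filter]
  have : ∀ y : String, (!PySem.Set.contains [k] y) = (y != k) := by
    intro y; by_cases hyk : y = k
    · simp [hyk]
    · simp [hyk]
  simp only [List.singleton_append, List.filter_congr (fun y _ => this y)]


theorem altProd_eq (ks : List String) :
    altProd ks = ((PySem.Set.ofList ks).map (fun j => (ks.count j : Int) + 1)).prod := by
  fun_induction altProd ks with
  | case1 => rfl
  | case2 k rest ih =>
    rw [ofList_cons, List.map_cons, List.prod_cons]
    congr 1
    simp only [List.filter_cons, bne_self_eq_false, Bool.false_eq_true, if_false] at ih ⊢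
    rw [ih, ofList_filter]
    congr 1
    apply List.map_congr_left
    intro j hj
    have hjk : (j != k) = true := (List.mem_filter.1 hj).2
    have hjk' : j ≠ k := by simpa using hjk
    congr 1
    rw [List.count_filter (p := fun x => x != k) hjk, List.count_cons]
    simp [hjk'.symm]


theorem foldl_mul_succ (l : List Int) (x : Int) :
    l.foldl (fun a cnt => a * (cnt + 1)) x = x * (l.map (fun c => c + 1)).prod := by
  induction l generalizing x with
  | nil => simp
  | cons c t ih => simp [List.foldl_cons, ih, mul_assoc]


theorem solution_eq (clothes : List (String × String)) :
    solution clothes = altProd (clothes.map (fun c => c.2)) - 1 := by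
  have hfun : (fun (d : PySem.Dict String Int) (c : String × String) =>
      if d.contains c.2 then d.insert c.2 (d.getD c.2 0 + 1) else d.insert c.2 1)
      = fun d c => d.insert c.2 (d.getD c.2 0 + 1) := by
    funext d c
    by_cases h : d.contains c.2
    · simp [h]
    · have h0 : d.getD c.2 0 = 0 := PySem.Dict.getD_of_not_contains d 0 (by simpa using h)
      simp [h, h0]
  have hdict : (clothes.foldl (fun d c =>
      if d.contains c.2 then d.insert c.2 (d.getD c.2 0 + 1) else d.insert c.2 1)
      PySem.Dict.empty) = PySem.Dict.counter (clothes.map (fun c => c.2)) := by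
    rw [hfun, ← PySem.Dict.foldl_insert_getD_add_one_eq_counter, List.foldl_map]
  have hv : (PySem.Dict.counter (clothes.map (fun c => c.2))).values
      = (PySem.Set.ofList (clothes.map (fun c => c.2))).map
          (fun k => ((clothes.map (fun c => c.2)).count k : Int)) := by
    simp [PySem.Dict.values, PySem.Dict.items_counter]
  unfold solution
  dsimp only
  rw [hdict, hv, foldl_mul_succ, one_mul, List.map_map, altProd_eq]
  rfl

-- ===== VERDICT (by name: the statement is the Claim_ definition above) =====
theorem solution_spec : Claim_equal_solution := by
  intro clothes _
  exact solution_eq clothes
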